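-- pv_equiv track=rewrite | github.com/AyushmanMohapatra015/AI | Assignment-4/MapColoring_CSP/MapColoring_CSP.py | backtrack
-- ===== SOURCE A (Python) =====
-- variables = ["WA", "NT", "Q", "SA", "NSW", "V", "T"]
--
-- domains = {v: ["Red", "Green", "Blue"] for v in variables}
--
-- neighbors = {
--     "WA": ["NT", "SA"],
--     "NT": ["WA", "SA", "Q"],
--     "Q": ["NT", "SA", "NSW"],
--     "SA": ["WA", "NT", "Q", "NSW", "V"],
--     "NSW": ["Q", "SA", "V"],
--     "V": ["SA", "NSW"],
--     "T": []
-- }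
--
-- def is_consistent(var, value, assignment):
--     return all(assignment.get(n) != value for n in neighbors[var])
--
-- def select_unassigned_variable(assignment):
--     for v in variables:
--         if v not in assignment:
--             return v
--
-- def backtrack(assignment):
--     if len(assignment) == len(variables):
--         return assignment
--
--     var = select_unassigned_variable(assignment)
--
--     for value in domains[var]:
--         if is_consistent(var, value, assignment):
--             assignment[var] = value
--             result = backtrack(assignment)
--             if result:
--                 return result
--             del assignment[var]
--
--     return None
-- ===== SOURCE B (Python) =====
-- variables = ["WA", "NT", "Q", "SA", "NSW", "V", "T"]
--
-- domains = {v: ["Red", "Green", "Blue"] for v in variables}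
--
-- neighbors = {
--     "WA": ["NT", "SA"],
--     "NT": ["WA", "SA", "Q"],
--     "Q": ["NT", "SA", "NSW"],
--     "SA": ["WA", "NT", "Q", "NSW", "V"],
--     "NSW": ["Q", "SA", "V"],
--     "V": ["SA", "NSW"],
--     "T": []
-- }
--
-- def is_consistent(var, value, assignment):
--     return all(assignment.get(n) != value for n in neighbors[var])
--
-- def select_unassigned_variable(assignment):
--     for v in variables:
--         if v not in assignment:
--             return v
--
-- def backtrack(assignment):
--     # iterative depth-first search with an explicit stack of (variable, next color index) frames
--     if len(assignment) == len(variables):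
--         return assignment
--     stack = [(select_unassigned_variable(assignment), 0)]
--     while stack:
--         var, i = stack.pop()
--         colors = domains[var]
--         j = i
--         while j < len(colors) and not is_consistent(var, colors[j], assignment):
--             j += 1
--         if j < len(colors):
--             assignment[var] = colors[j]
--             if len(assignment) == len(variables):
--                 return assignment
--             stack.append((var, j + 1))
--             stack.append((select_unassigned_variable(assignment), 0))
--         elif stack:
--             del assignment[stack[-1][0]]
--     return None
-- ===== Notes on version B (the rewrite author's own statement) =====
-- stated objective: alternative
-- what changed: the recursive backtracking (call per variable, for-loop over colors, del on failure) is replaced by an iterative machine with an explicit stack of (variable, next-color-index) frames that mutates the assignment dict in place and restores it on dead ends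
import Mathlib
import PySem

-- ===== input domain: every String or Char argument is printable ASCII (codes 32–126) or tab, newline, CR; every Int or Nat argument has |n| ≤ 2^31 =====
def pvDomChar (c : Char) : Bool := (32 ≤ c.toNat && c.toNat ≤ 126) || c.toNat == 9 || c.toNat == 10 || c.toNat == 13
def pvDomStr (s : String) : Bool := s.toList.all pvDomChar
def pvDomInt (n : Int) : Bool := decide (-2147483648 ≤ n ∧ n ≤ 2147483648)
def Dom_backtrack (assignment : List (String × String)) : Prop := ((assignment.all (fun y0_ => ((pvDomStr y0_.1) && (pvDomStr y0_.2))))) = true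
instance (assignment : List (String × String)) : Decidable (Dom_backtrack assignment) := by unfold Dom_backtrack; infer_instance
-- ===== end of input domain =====

-- B rewrites the recursive backtracking as an iterative explicit-stack machine (same search order);
-- the equivalence is about the RETURN value only: both Pythons also mutate the passed dict in place
-- in the same way (entries added, and removed again on dead ends).

-- ===== PORT A =====
-- shared module constants/helpers (used verbatim by both Pythons)
def variablesL : List String := ["WA", "NT", "Q", "SA", "NSW", "V", "T"]

-- domains[v]: the dict comprehension maps every variable to the same color list
-- (only v ∈ variablesL ever reaches this lookup inside Pre_)
def domainsL (_v : String) : List String := ["Red", "Green", "Blue"]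

def neighborsL (v : String) : List String :=
  if v == "WA" then ["NT", "SA"]
  else if v == "NT" then ["WA", "SA", "Q"]
  else if v == "Q" then ["NT", "SA", "NSW"]
  else if v == "SA" then ["WA", "NT", "Q", "NSW", "V"]
  else if v == "NSW" then ["Q", "SA", "V"]
  else if v == "V" then ["SA", "NSW"]
  else []   -- "T" ↦ []; other keys never reach this lookup inside Pre_

def keysOf (a : List (String × String)) : List String := a.map Prod.fst

-- dict lookup .get (first match)
def dget? (k : String) : List (String × String) → Option String
  | [] => none
  | (k', v') :: rest => if k' == k then some v' else dget? k rest

-- assignment[k] = v (overwrite in place, new key appends)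
def dinsert (a : List (String × String)) (k v : String) : List (String × String) :=
  match a with
  | [] => [(k, v)]
  | (k', v') :: rest => if k' == k then (k, v) :: rest else (k', v') :: dinsert rest k v

-- del assignment[k] (k present in all reachable uses)
def derase (a : List (String × String)) (k : String) : List (String × String) :=
  match a with
  | [] => []
  | (k', v') :: rest => if k' == k then rest else (k', v') :: derase rest k

def is_consistent (var value : String) (assignment : List (String × String)) : Bool :=
  (neighborsL var).all (fun n => !(dget? n assignment == some value))

def select_unassigned (assignment : List (String × String)) : Option String :=
  variablesL.find? (fun v => !(keysOf assignment).contains v)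

-- A's recursion, fueled (depth ≤ number of unassigned variables + 1 ≤ 8, so fuel 8 is exact)
mutual
def btF (f : Nat) (a : List (String × String)) : Option (List (String × String)) :=
  match f with
  | 0 => none
  | f + 1 =>
    if a.length = variablesL.length then some a
    else
      match select_unassigned a with
      | none => none      -- Python: domains[None] raises KeyError; excluded by Pre_
      | some v => tryF f v (domainsL v) a
termination_by (f, 0)

def tryF (f : Nat) (v : String) (cs : List String) (a : List (String × String)) :
    Option (List (String × String)) :=
  match cs with
  | [] => none
  | c :: cs' =>
    if is_consistent v c a then
      match btF f (dinsert a v c) with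
      | some r => if r.isEmpty then tryF f v cs' a else some r   -- Python: 'if result:' (empty dict falsy)
      | none => tryF f v cs' a
    else tryF f v cs' a
termination_by (f, cs.length + 1)
end

def backtrack (assignment : List (String × String)) : Option (List (String × String)) :=
  btF (variablesL.length + 1) assignment

-- ===== PORT B =====
-- inner while loop of B: first consistent color at index ≥ i, with its index
def scanColors (v : String) (a : List (String × String)) : List String → Nat → Option (Nat × String)
  | [], _ => none
  | c :: cs, j => if is_consistent v c a then some (j, c) else scanColors v a cs (j + 1)

-- the while loop over the explicit stack, fueled (fuel 5^10 shown sufficient inside Pre_)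
def runMachine : Nat → List (String × Nat) → List (String × String) → Option (List (String × String))
  | 0, _, _ => none
  | _ + 1, [], _ => none
  | F + 1, (v, i) :: S, a =>
    match scanColors v a ((domainsL v).drop i) i with
    | some (j, c) =>
      let a' := dinsert a v c
      if a'.length = variablesL.length then some a'
      else
        match select_unassigned a' with
        | none => none    -- Python: the pushed None frame raises KeyError on the next pop; excluded by Pre_
        | some v' => runMachine F ((v', 0) :: (v, j + 1) :: S) a'
    | none =>
      match S with
      | [] => runMachine F [] a
      | (pv, pj) :: S' => runMachine F ((pv, pj) :: S') (derase a pv)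

def backtrack_alt (assignment : List (String × String)) : Option (List (String × String)) :=
  if assignment.length = variablesL.length then some assignment
  else
    match select_unassigned assignment with
    | none => none        -- Python: domains[None] raises KeyError on the first pop; excluded by Pre_
    | some v => runMachine 9765625 [(v, 0)] assignment

-- ===== PRECONDITION & SPEC =====
-- Pre_ excludes association lists with duplicate keys (they do not arise from a Python dict) and
-- dicts with more than 7 entries, on which A's recursion can pass select's None to domains[...]
-- and raise KeyError (whether it raises or returns None there depends on the search).
def Pre_backtrack (assignment : List (String × String)) : Prop :=
  (assignment.map Prod.fst).Nodup ∧ assignment.length ≤ 7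

instance (assignment : List (String × String)) : Decidable (Pre_backtrack assignment) := by
  unfold Pre_backtrack; infer_instance

def pvWitness_backtrack : (List (String × String)) := []

def Spec_backtrack (assignment : List (String × String)) (out : Option (List (String × String))) : Prop := out = backtrack_alt assignment
instance (assignment : List (String × String)) (out : Option (List (String × String))) : Decidable (Spec_backtrack assignment out) := by unfold Spec_backtrack; infer_instance

-- ===== CLAIM (what is proved, stated in full; the proofs are below) =====
def Claim_equal_backtrack : Prop := ∀ (assignment : List (String × String)), Dom_backtrack assignment → Pre_backtrack assignment → Spec_backtrack assignment (backtrack assignment)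

-- ===== LEMMAS AND PROOFS =====

-- the meaning of a machine state: try the top frame's remaining colors, else unwind the stack
def tryA (v : String) (i : Nat) (a : List (String × String)) : Option (List (String × String)) :=
  tryF 8 v ((domainsL v).drop i) a

def Res : List (String × Nat) → List (String × String) → Option (List (String × String))
  | [], _ => none
  | (v, i) :: S, a =>
    match tryA v i (derase a v) with
    | some r => some r
    | none => Res S (derase a v)

-- invariant for frames below the top: assigned, index 1..3
def Below : List (String × Nat) → List (String × String) → Prop
  | [], _ => True
  | (v, i) :: S, a => v ∈ variablesL ∧ 1 ≤ i ∧ i ≤ 3 ∧ v ∈ keysOf a ∧ Below S (derase a v)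

def MInv : List (String × Nat) → List (String × String) → Prop
  | [], _ => True
  | (v, i) :: S, a =>
    (keysOf a).Nodup ∧ a.length < 7 ∧ v ∈ variablesL ∧ i ≤ 3 ∧ v ∉ keysOf a ∧ Below S a

-- termination potential of a machine state
def muAux : List (String × Nat) → Nat → Nat
  | [], _ => 0
  | (_, i) :: rest, h => (4 - i) * 5 ^ (8 - h) + muAux rest (h + 1)

def mu (S : List (String × Nat)) : Nat := muAux S.reverse 1

-- ---- dict lemmas ----
theorem dinsert_absent (a : List (String × String)) (k v : String) (h : k ∉ keysOf a) :
    dinsert a k v = a ++ [(k, v)] := by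
  induction a with
  | nil => rfl
  | cons p rest ih =>
    obtain ⟨k', v'⟩ := p
    simp only [keysOf, List.map_cons, List.mem_cons] at h
    push Not at h
    have hne : (k' == k) = false := by simp; exact fun e => h.1 e.symm
    simp [dinsert, hne, ih (by simpa [keysOf] using h.2)]

theorem derase_absent (a : List (String × String)) (k : String) (h : k ∉ keysOf a) :
    derase a k = a := by
  induction a with
  | nil => rfl
  | cons p rest ih =>
    obtain ⟨k', v'⟩ := p
    simp only [keysOf, List.map_cons, List.mem_cons] at h
    push Not at h
    have hne : (k' == k) = false := by simp; exact fun e => h.1 e.symm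
    simp [derase, hne, ih (by simpa [keysOf] using h.2)]

theorem derase_append (a : List (String × String)) (k v : String) (h : k ∉ keysOf a) :
    derase (a ++ [(k, v)]) k = a := by
  induction a with
  | nil => simp [derase]
  | cons p rest ih =>
    obtain ⟨k', v'⟩ := p
    simp only [keysOf, List.map_cons, List.mem_cons] at h
    push Not at h
    have hne : (k' == k) = false := by simp; exact fun e => h.1 e.symm
    simp [derase, hne, ih (by simpa [keysOf] using h.2)]

theorem derase_length (a : List (String × String)) (k : String) (h : k ∈ keysOf a) :
    (derase a k).length + 1 = a.length := by
  induction a with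
  | nil => simp [keysOf] at h
  | cons p rest ih =>
    obtain ⟨k', v'⟩ := p
    by_cases he : k' = k
    · simp [derase, he]
    · have hne : (k' == k) = false := by simp [he]
      have hmem : k ∈ keysOf rest := by
        simp only [keysOf, List.map_cons, List.mem_cons] at h
        rcases h with h | h
        · exact absurd h.symm he
        · simpa [keysOf] using h
      simp [derase, hne, ih hmem]

theorem keysOf_derase (a : List (String × String)) (k : String) :
    keysOf (derase a k) = (keysOf a).erase k := by
  induction a with
  | nil => rfl
  | cons p rest ih =>
    obtain ⟨k', v'⟩ := p
    by_cases he : k' = k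
    · simp [derase, he, keysOf]
    · have hne : (k' == k) = false := by simp [he]
      simp [derase, hne, keysOf]
      simpa [keysOf] using ih

theorem keysOf_derase_nodup (a : List (String × String)) (k : String)
    (h : (keysOf a).Nodup) : (keysOf (derase a k)).Nodup := by
  rw [keysOf_derase]; exact h.erase k

theorem not_mem_keysOf_derase (a : List (String × String)) (k : String)
    (h : (keysOf a).Nodup) : k ∉ keysOf (derase a k) := by
  rw [keysOf_derase]; exact h.not_mem_erase

-- ---- select lemmas ----
theorem select_some (a : List (String × String)) (v : String)
    (h : select_unassigned a = some v) : v ∈ variablesL ∧ v ∉ keysOf a := by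
  refine ⟨List.mem_of_find?_eq_some h, ?_⟩
  have hp := List.find?_some h
  simpa using hp

theorem select_none (a : List (String × String)) (h : select_unassigned a = none)
    (_hnd : (keysOf a).Nodup) : 7 ≤ a.length := by
  have hall := List.find?_eq_none.mp h
  have hsub : variablesL ⊆ keysOf a := by
    intro x hx
    have := hall x hx
    simpa using this
  have hvnd : variablesL.Nodup := by decide
  have hle := (List.subperm_of_subset hvnd hsub).length_le
  have hkeys : (keysOf a).length = a.length := by simp [keysOf]
  have h7 : variablesL.length = 7 := rfl
  omega

-- ---- A-side lemmas ----
theorem btF_zero (a : List (String × String)) : btF 0 a = none := by rw [btF]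

theorem btF_succ (f : Nat) (a : List (String × String)) :
    btF (f + 1) a =
      if a.length = variablesL.length then some a
      else
        match select_unassigned a with
        | none => none
        | some v => tryF f v (domainsL v) a := by rw [btF]

theorem tryF_nil (f : Nat) (v : String) (a : List (String × String)) :
    tryF f v [] a = none := by rw [tryF]

theorem tryF_cons (f : Nat) (v c : String) (cs : List String) (a : List (String × String)) :
    tryF f v (c :: cs) a =
      if is_consistent v c a then
        match btF f (dinsert a v c) with
        | some r => if r.isEmpty then tryF f v cs a else some r
        | none => tryF f v cs a
      else tryF f v cs a := by rw [tryF]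

theorem tryF_skip (f : Nat) (v : String) (p cs : List String) (a : List (String × String))
    (h : ∀ c ∈ p, is_consistent v c a = false) : tryF f v (p ++ cs) a = tryF f v cs a := by
  induction p with
  | nil => simp
  | cons c p' ih =>
    have hc := h c (by simp)
    rw [List.cons_append, tryF]
    simp only [hc, Bool.false_eq_true, if_false]
    exact ih (fun c' hc' => h c' (by simp [hc']))

theorem tryF_none (f : Nat) (v : String) (p : List String) (a : List (String × String))
    (h : ∀ c ∈ p, is_consistent v c a = false) : tryF f v p a = none := by
  have h2 := tryF_skip f v p [] a h
  rw [List.append_nil] at h2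
  rw [h2, tryF]

theorem btF_length (f : Nat) :
    (∀ a r, btF f a = some r → r.length = variablesL.length) ∧
    (∀ v cs a r, tryF f v cs a = some r → r.length = variablesL.length) := by
  induction f with
  | zero =>
    have hbt : ∀ a r, btF 0 a = some r → r.length = variablesL.length := by
      intro a r h; rw [btF_zero] at h; cases h
    refine ⟨hbt, ?_⟩
    intro v cs a r h
    induction cs with
    | nil => rw [tryF_nil] at h; cases h
    | cons c cs' ih =>
      rw [tryF_cons] at h
      by_cases hc : is_consistent v c a
      · simp only [hc, if_true] at h
        cases hbt2 : btF 0 (dinsert a v c) with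
        | some r' => rw [btF_zero] at hbt2; cases hbt2
        | none => rw [hbt2] at h; exact ih h
      · simp only [hc, Bool.false_eq_true, if_false] at h; exact ih h
  | succ f IH =>
    have hbt : ∀ a r, btF (f + 1) a = some r → r.length = variablesL.length := by
      intro a r h
      rw [btF_succ] at h
      split_ifs at h with h7
      · cases h; exact h7
      · cases hsel : select_unassigned a with
        | none => rw [hsel] at h; cases h
        | some v => rw [hsel] at h; exact IH.2 v _ a r h
    refine ⟨hbt, ?_⟩
    intro v cs a r h
    induction cs with
    | nil => rw [tryF_nil] at h; cases h
    | cons c cs' ih =>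
      rw [tryF_cons] at h
      split_ifs at h with hc
      · cases hbt2 : btF (f + 1) (dinsert a v c) with
        | some r' =>
          rw [hbt2] at h
          by_cases he : r'.isEmpty
          · simp only [he, if_true] at h; exact ih h
          · simp only [he, Bool.false_eq_true, if_false] at h
            cases h; exact hbt _ _ hbt2
        | none => rw [hbt2] at h; exact ih h
      · exact ih h

theorem btF_stable (k : Nat) : ∀ (a : List (String × String)), a.length ≤ 7 → 7 - a.length = k →
    ∀ f g, k < f → k < g → btF f a = btF g a := by
  induction k using Nat.strong_induction_on with
  | _ k IH =>
  intro a hle hk f g hf hg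
  match f, g with
  | 0, _ => omega
  | _ + 1, 0 => omega
  | f₀ + 1, g₀ + 1 =>
  rw [btF_succ, btF_succ]
  by_cases h7 : a.length = variablesL.length
  · simp [h7]
  · simp only [h7, if_false]
    cases hsel : select_unassigned a with
    | none => rfl
    | some v =>
      obtain ⟨hvv, hvk⟩ := select_some a v hsel
      have h7' : variablesL.length = 7 := rfl
      have hlt : a.length < 7 := by omega
      have inner : ∀ cs, tryF f₀ v cs a = tryF g₀ v cs a := by
        intro cs
        induction cs with
        | nil => rw [tryF_nil, tryF_nil]
        | cons c cs' ih =>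
          rw [tryF_cons, tryF_cons]
          have hlen' : (dinsert a v c).length = a.length + 1 := by
            rw [dinsert_absent a v c hvk]; simp
          have hbt : btF f₀ (dinsert a v c) = btF g₀ (dinsert a v c) :=
            IH (k - 1) (by omega) _ (by omega) (by omega) f₀ g₀ (by omega) (by omega)
          by_cases hc : is_consistent v c a
          · simp only [hc, if_true]
            rw [hbt, ih]
          · simp only [hc, Bool.false_eq_true, if_false]; exact ih
      simp only [inner]

theorem tryF_stable (v : String) (cs : List String) (f g : Nat) (a : List (String × String))
    (hlen : a.length < 7) (hk : v ∉ keysOf a) (hf : 7 - a.length ≤ f) (hg : 7 - a.length ≤ g) :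
    tryF f v cs a = tryF g v cs a := by
  induction cs with
  | nil => rw [tryF_nil, tryF_nil]
  | cons c cs' ih =>
    rw [tryF_cons, tryF_cons]
    have hlen' : (dinsert a v c).length = a.length + 1 := by
      rw [dinsert_absent a v c hk]; simp
    have hbt : btF f (dinsert a v c) = btF g (dinsert a v c) :=
      btF_stable (7 - (a.length + 1)) _ (by omega) (by omega) f g (by omega) (by omega)
    by_cases hc : is_consistent v c a
    · simp only [hc, if_true]; rw [hbt, ih]
    · simp only [hc, Bool.false_eq_true, if_false]; exact ih

-- ---- scan lemmas ----
theorem scan_none (v : String) (a : List (String × String)) (cs : List String) :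
    ∀ j, scanColors v a cs j = none → ∀ c ∈ cs, is_consistent v c a = false := by
  induction cs with
  | nil => intro j _ c hc; cases hc
  | cons c0 cs' ih =>
    intro j h c hc
    by_cases hc0 : is_consistent v c0 a
    · simp [scanColors, hc0] at h
    · simp only [scanColors, hc0, Bool.false_eq_true, if_false] at h
      rcases List.mem_cons.mp hc with rfl | hc
      · simpa using hc0
      · exact ih (j + 1) h c hc

theorem scan_some (v : String) (a : List (String × String)) (cs : List String) :
    ∀ j j' c, scanColors v a cs j = some (j', c) →
    ∃ p q, cs = p ++ c :: q ∧ (∀ c' ∈ p, is_consistent v c' a = false) ∧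
      is_consistent v c a = true ∧ j' = j + p.length := by
  induction cs with
  | nil => intro j j' c h; simp [scanColors] at h
  | cons c0 cs' ih =>
    intro j j' c h
    by_cases hc0 : is_consistent v c0 a
    · simp only [scanColors, hc0, if_true, Option.some.injEq, Prod.mk.injEq] at h
      obtain ⟨rfl, rfl⟩ := h
      exact ⟨[], cs', by simp, by simp, hc0, by simp⟩
    · simp only [scanColors, hc0, Bool.false_eq_true, if_false] at h
      obtain ⟨p, q, hcs, hbad, hcons, hj⟩ := ih (j + 1) j' c h
      refine ⟨c0 :: p, q, by simp [hcs], ?_, hcons, by simp [hj]; omega⟩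
      intro c' hc'
      rcases List.mem_cons.mp hc' with rfl | hc'
      · simpa using hc0
      · exact hbad c' hc'

-- ---- potential lemmas ----
theorem muAux_append (l l' : List (String × Nat)) : ∀ h : Nat,
    muAux (l ++ l') h = muAux l h + muAux l' (h + l.length) := by
  induction l with
  | nil => intro h; simp [muAux]
  | cons p rest ih =>
    intro h
    obtain ⟨v, i⟩ := p
    simp only [List.cons_append, muAux, ih (h + 1), List.length_cons]
    have : h + 1 + rest.length = h + (rest.length + 1) := by omega
    rw [this]
    ring

theorem below_length (S : List (String × Nat)) : ∀ (a : List (String × String)),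
    Below S a → S.length ≤ a.length := by
  induction S with
  | nil => intro a _; simp
  | cons p S' ih =>
    intro a hb
    obtain ⟨v, i⟩ := p
    obtain ⟨_, _, _, hmem, hb'⟩ := hb
    have h1 := derase_length a v hmem
    have h2 := ih _ hb'
    simp only [List.length_cons]
    omega

-- ---- main simulation lemma ----
theorem run_nil (F : Nat) (a : List (String × String)) : runMachine F [] a = none := by
  cases F <;> rfl

theorem run_cons (F : Nat) (v : String) (i : Nat) (S : List (String × Nat))
    (a : List (String × String)) :
    runMachine (F + 1) ((v, i) :: S) a =
      (match scanColors v a ((domainsL v).drop i) i with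
       | some (j, c) =>
         let a' := dinsert a v c
         if a'.length = variablesL.length then some a'
         else
           match select_unassigned a' with
           | none => none
           | some v' => runMachine F ((v', 0) :: (v, j + 1) :: S) a'
       | none =>
         match S with
         | [] => runMachine F [] a
         | (pv, pj) :: S' => runMachine F ((pv, pj) :: S') (derase a pv)) := by
  rw [runMachine.eq_def]

theorem mu_cons (v : String) (i : Nat) (S : List (String × Nat)) :
    mu ((v, i) :: S) = mu S + (4 - i) * 5 ^ (7 - S.length) := by
  have h : (8 : Nat) - (1 + S.length) = 7 - S.length := by omega
  simp [mu, List.reverse_cons, muAux_append, muAux, h]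

theorem tryA_length (v : String) (i : Nat) (a : List (String × String))
    (r : List (String × String)) (h : tryA v i a = some r) : r.length = 7 := by
  exact (btF_length 8).2 v _ a r h

theorem runEq (F : Nat) : ∀ S a, MInv S a → mu S < F → runMachine F S a = Res S a := by
  induction F with
  | zero => intro S a _ h; omega
  | succ F IH =>
    intro S₀ a hInv hmu
    cases S₀ with
    | nil => rw [run_nil]; rfl
    | cons fr S =>
      obtain ⟨v, i⟩ := fr
      obtain ⟨hnd, hlen, hvv, hi, hvk, hbelow⟩ := hInv
      have hda : derase a v = a := derase_absent a v hvk
      have h7' : variablesL.length = 7 := rfl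
      have hres : Res ((v, i) :: S) a =
          (match tryA v i (derase a v) with
           | some r => some r
           | none => Res S (derase a v)) := by rw [Res]
      cases hscan : scanColors v a ((domainsL v).drop i) i with
      | none =>
        have hall := scan_none v a _ i hscan
        have htryA : tryA v i a = none := tryF_none 8 v _ a hall
        rw [hres, hda, htryA]
        cases S with
        | nil =>
          have hstep : runMachine (F + 1) ((v, i) :: ([] : List (String × Nat))) a =
              runMachine F [] a := by rw [run_cons, hscan]
          rw [hstep, run_nil]
          rfl
        | cons pf S' =>
          obtain ⟨pv, pj⟩ := pf
          obtain ⟨hpvv, hpj1, hpj3, hpvmem, hbelow'⟩ := hbelow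
          have hstep : runMachine (F + 1) ((v, i) :: (pv, pj) :: S') a =
              runMachine F ((pv, pj) :: S') (derase a pv) := by rw [run_cons, hscan]
          have hdl := derase_length a pv hpvmem
          have hInv2 : MInv ((pv, pj) :: S') (derase a pv) :=
            ⟨keysOf_derase_nodup a pv hnd, by omega, hpvv, hpj3,
             not_mem_keysOf_derase a pv hnd, hbelow'⟩
          have hdec : mu ((pv, pj) :: S') < mu ((v, i) :: (pv, pj) :: S') := by
            rw [mu_cons v i ((pv, pj) :: S')]
            have hpos : 0 < (4 - i) * 5 ^ (7 - ((pv, pj) :: S').length) :=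
              Nat.mul_pos (by omega) (pow_pos (by norm_num) _)
            omega
          rw [hstep, IH _ _ hInv2 (by omega)]
          have hdd : derase (derase a pv) pv = derase a pv :=
            derase_absent _ pv (not_mem_keysOf_derase a pv hnd)
          show (match tryA pv pj (derase (derase a pv) pv) with
                | some r => some r
                | none => Res S' (derase (derase a pv) pv)) =
               (match tryA pv pj (derase a pv) with
                | some r => some r
                | none => Res S' (derase a pv))
          rw [hdd]
      | some jc =>
        obtain ⟨j, c⟩ := jc
        obtain ⟨p, q, hcs, hbad, hcons, hj⟩ := scan_some v a _ i j c hscan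
        have ha' : dinsert a v c = a ++ [(v, c)] := dinsert_absent a v c hvk
        have hlen' : (dinsert a v c).length = a.length + 1 := by rw [ha']; simp
        have hkeys' : keysOf (dinsert a v c) = keysOf a ++ [v] := by
          rw [ha']; simp [keysOf]
        have hnd' : (keysOf (dinsert a v c)).Nodup := by
          rw [hkeys']
          simp [List.nodup_append, hnd]
          intro x hx e
          exact hvk (e ▸ hx)
        have herase' : derase (dinsert a v c) v = a := by
          rw [ha']; exact derase_append a v c hvk
        have hdomlen : ((domainsL v).drop i).length = 3 - i := by simp [domainsL]
        have hlq : 3 - i = p.length + 1 + q.length := by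
          rw [← hdomlen, hcs]; simp; omega
        have hj2 : j + 1 ≤ 3 := by omega
        have hq : (domainsL v).drop (j + 1) = q := by
          have h1 : (domainsL v).drop (j + 1) = ((domainsL v).drop i).drop (p.length + 1) := by
            rw [List.drop_drop]; congr 1; omega
          rw [h1, hcs, show p ++ c :: q = (p ++ [c]) ++ q by simp,
            show p.length + 1 = (p ++ [c]).length by simp, List.drop_left]
        have hskip : tryA v i a = tryF 8 v (c :: q) a := by
          unfold tryA; rw [hcs]; exact tryF_skip 8 v p (c :: q) a hbad
        have hstep : runMachine (F + 1) ((v, i) :: S) a =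
            (if (dinsert a v c).length = variablesL.length then some (dinsert a v c)
             else
               match select_unassigned (dinsert a v c) with
               | none => none
               | some v' => runMachine F ((v', 0) :: (v, j + 1) :: S) (dinsert a v c)) := by
          rw [run_cons, hscan]
        rw [hstep, hres, hda]
        by_cases h7 : (dinsert a v c).length = variablesL.length
        · have hbt : btF 8 (dinsert a v c) = some (dinsert a v c) := by
            rw [show (8 : Nat) = 7 + 1 from rfl, btF_succ]
            simp [h7]
          have hne : (dinsert a v c).isEmpty = false := by
            cases hd : dinsert a v c with
            | nil => rw [hd] at hlen'; simp at hlen'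
            | cons _ _ => rfl
          have htryA : tryA v i a = some (dinsert a v c) := by
            rw [hskip, tryF_cons]
            simp [hcons, hbt, hne]
          rw [htryA]
          simp [h7]
        · simp only [h7, if_false]
          cases hsel : select_unassigned (dinsert a v c) with
          | none =>
            have hge := select_none _ hsel hnd'
            omega
          | some v' =>
            obtain ⟨hv'v, hv'k⟩ := select_some _ v' hsel
            have hbtF : btF 8 (dinsert a v c) = tryA v' 0 (dinsert a v c) := by
              rw [show (8 : Nat) = 7 + 1 from rfl, btF_succ]
              simp only [h7, if_false]
              rw [hsel]
              unfold tryA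
              rw [List.drop_zero]
              exact tryF_stable v' _ 7 8 _ (by omega) hv'k (by omega) (by omega)
            have hSlen : S.length ≤ 6 := by
              have := below_length S a hbelow
              omega
            have hInv2 : MInv ((v', 0) :: (v, j + 1) :: S) (dinsert a v c) := by
              refine ⟨hnd', by omega, hv'v, by omega, hv'k, hvv, by omega, hj2, ?_, ?_⟩
              · rw [hkeys']; simp
              · rw [herase']; exact hbelow
            have hdec : mu ((v', 0) :: (v, j + 1) :: S) < mu ((v, i) :: S) := by
              rw [mu_cons, mu_cons, mu_cons]
              simp only [List.length_cons]
              have h76 : (7 : Nat) - (S.length + 1) = 6 - S.length := by omega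
              have hW : 7 - S.length = (6 - S.length) + 1 := by omega
              rw [h76, hW, pow_succ]
              set W := (5 : Nat) ^ (6 - S.length) with hWdef
              have hW1 : 0 < W := pow_pos (by norm_num) _
              have key : (4 - (j + 1)) * (W * 5) + 4 * W < (4 - i) * (W * 5) := by
                have h1 : (4 - (j + 1)) + 1 ≤ 4 - i := by omega
                calc (4 - (j + 1)) * (W * 5) + 4 * W
                    < (4 - (j + 1)) * (W * 5) + 5 * W :=
                      Nat.add_lt_add_left (by omega) _
                  _ = ((4 - (j + 1)) + 1) * (W * 5) := by ring
                  _ ≤ (4 - i) * (W * 5) := Nat.mul_le_mul_right _ h1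
              linarith [key]
            show runMachine F ((v', 0) :: (v, j + 1) :: S) (dinsert a v c) =
                (match tryA v i a with
                 | some r => some r
                 | none => Res S a)
            rw [IH _ _ hInv2 (by omega)]
            have hresN : Res ((v', 0) :: (v, j + 1) :: S) (dinsert a v c) =
                (match tryA v' 0 (dinsert a v c) with
                 | some r => some r
                 | none =>
                   match tryA v (j + 1) a with
                   | some r => some r
                   | none => Res S a) := by
              have e1 : derase (dinsert a v c) v' = dinsert a v c := derase_absent _ v' hv'k
              have e3 : Res ((v, j + 1) :: S) (dinsert a v c) =
                  (match tryA v (j + 1) a with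
                   | some r => some r
                   | none => Res S a) := by
                rw [Res, herase']
              rw [Res, e1, e3]
            rw [hresN]
            have htryA : tryA v i a =
                (match tryA v' 0 (dinsert a v c) with
                 | some r => if r.isEmpty then tryA v (j + 1) a else some r
                 | none => tryA v (j + 1) a) := by
              rw [hskip, tryF_cons]
              simp only [hcons, if_true]
              rw [hbtF]
              have e2 : tryF 8 v q a = tryA v (j + 1) a := by unfold tryA; rw [hq]
              cases tryA v' 0 (dinsert a v c) <;> simp [e2]
            rw [htryA]
            cases hx : tryA v' 0 (dinsert a v c) with
            | none =>
              cases tryA v (j + 1) a <;> rfl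
            | some r =>
              have hrlen : r.length = 7 := tryA_length v' 0 _ r hx
              have hne : r.isEmpty = false := by
                cases hr : r with
                | nil => rw [hr] at hrlen; simp at hrlen
                | cons _ _ => rfl
              simp [hne]

-- ===== VERDICT (by name: the statement is the Claim_ definition above) =====
theorem backtrack_spec : Claim_equal_backtrack := by
  unfold Claim_equal_backtrack
  intro a _ hpre
  obtain ⟨hnd, hlen⟩ := hpre
  unfold Spec_backtrack backtrack backtrack_alt
  rw [show variablesL.length + 1 = 7 + 1 from rfl, btF_succ]
  by_cases h7 : a.length = variablesL.length
  · simp [h7]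
  · simp only [h7, if_false]
    cases hsel : select_unassigned a with
    | none => rfl
    | some v =>
      obtain ⟨hvv, hvk⟩ := select_some a v hsel
      have h7' : variablesL.length = 7 := rfl
      have hlt : a.length < 7 := by omega
      have hA : tryF 7 v (domainsL v) a = tryA v 0 a := by
        unfold tryA
        rw [List.drop_zero]
        exact tryF_stable v _ 7 8 a hlt hvk (by omega) (by omega)
      have hInv : MInv [(v, 0)] a := ⟨hnd, hlt, hvv, by omega, hvk, trivial⟩
      have hmu : mu [(v, 0)] < 9765625 := by norm_num [mu, muAux]
      show tryF 7 v (domainsL v) a = runMachine 9765625 [(v, 0)] a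
      rw [runEq 9765625 [(v, 0)] a hInv hmu, hA]
      have hres : Res [(v, 0)] a =
          (match tryA v 0 (derase a v) with
           | some r => some r
           | none => none) := by
        rw [Res]
        cases tryA v 0 (derase a v) <;> rfl
      rw [hres, derase_absent a v hvk]
      cases tryA v 0 a <;> rfl
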